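-- pv_equiv track=rewrite | github.com/dpiper22/SI206Test | SI206/206proj.py | classSizes
-- ===== SOURCE A (Python) =====
-- def classSizes(data):
-- # Input: list of dictionaries
-- # Output: Return a list of tuples ordered by
-- # ClassName and Class size, e.g
-- # [('Senior', 26), ('Junior', 25), ('Freshman', 21), ('Sophomore', 18)]
--
-- 	#Your code here:
-- 	this_class = {'Senior':0, 'Junior':0, 'Sophomore':0, 'Freshman':0}
-- 	for x in data:
-- 		if x['Class'] == 'Senior':
-- 			this_class['Senior']+=1
-- 		elif x['Class'] == 'Junior':
-- 			this_class['Junior']+=1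
-- 		elif x['Class'] == 'Sophomore':
-- 			this_class['Sophomore']+=1
-- 		elif x['Class']=='Freshman':
-- 			this_class['Freshman']+=1
-- 	numb_class = list(this_class.items())
-- 	return sorted(numb_class, key=lambda y:y[1], reverse=True)
-- ===== SOURCE B (Python) =====
-- def classSizes(data):
--     cats = ['Senior', 'Junior', 'Sophomore', 'Freshman']
--     counts = [(c, sum(1 if x['Class'] == c else 0 for x in data)) for c in cats]
--     return sorted(counts, key=lambda y: y[1], reverse=True)
-- ===== Notes on version B (the rewrite author's own statement) =====
-- stated objective: alternative
-- what changed: Replaces A's single accumulating pass that updates a mutable 4-key dict with four independent per-category counting scans built by a comprehension, then the same stable descending sort.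
import Mathlib
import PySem

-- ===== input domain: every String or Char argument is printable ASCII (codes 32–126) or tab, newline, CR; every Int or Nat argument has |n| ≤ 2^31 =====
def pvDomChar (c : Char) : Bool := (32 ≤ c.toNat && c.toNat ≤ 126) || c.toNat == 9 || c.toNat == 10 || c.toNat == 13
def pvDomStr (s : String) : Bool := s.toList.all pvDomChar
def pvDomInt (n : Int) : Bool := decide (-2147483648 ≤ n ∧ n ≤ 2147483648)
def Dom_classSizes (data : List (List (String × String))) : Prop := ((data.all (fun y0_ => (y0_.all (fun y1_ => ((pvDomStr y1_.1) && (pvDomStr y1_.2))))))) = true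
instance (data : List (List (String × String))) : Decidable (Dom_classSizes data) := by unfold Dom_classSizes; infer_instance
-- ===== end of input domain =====

-- B replaces A's single accumulating pass over a mutable 4-key dict with four independent
-- per-category counting scans (one per class name, in A's key insertion order), then the same
-- stable descending sort; objective: alternative decomposition, same asymptotic cost.

-- x['Class'] for a row x: first-match dict lookup; exact under Pre_ (the key is present, so getD's default is never used)
def pvClassOf (x : List (String × String)) : String := (PySem.Dict.mk x).getD "Class" ""

-- ===== PORT A =====
def classSizes (data : List (List (String × String))) : List (String × Int) :=
  let this_class : PySem.Dict String Int :=
    ((((PySem.Dict.empty.insert "Senior" 0).insert "Junior" 0).insert "Sophomore" 0).insert "Freshman" 0)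
  let final := data.foldl (fun d x =>
    let c := pvClassOf x
    if c == "Senior" then d.modify "Senior" 0 (· + 1)
    else if c == "Junior" then d.modify "Junior" 0 (· + 1)
    else if c == "Sophomore" then d.modify "Sophomore" 0 (· + 1)
    else if c == "Freshman" then d.modify "Freshman" 0 (· + 1)
    else d) this_class
  PySem.List.sorted final.items (fun y => y.2) true

-- ===== PORT B =====
def classSizes_alt (data : List (List (String × String))) : List (String × Int) :=
  let cats := ["Senior", "Junior", "Sophomore", "Freshman"]
  let counts := cats.map (fun c =>
    (c, (data.map (fun x => if pvClassOf x == c then (1 : Int) else 0)).sum))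
  PySem.List.sorted counts (fun y => y.2) true

-- ===== PRECONDITION & SPEC =====
-- Pre_: every row has a 'Class' key — exactly the inputs where Python A returns instead of raising KeyError
def Pre_classSizes (data : List (List (String × String))) : Prop :=
  (data.all (fun x => x.any (fun p => p.1 == "Class"))) = true
instance (data : List (List (String × String))) : Decidable (Pre_classSizes data) := by
  unfold Pre_classSizes; infer_instance
def pvWitness_classSizes : (List (List (String × String))) :=
  [[("Class", "Senior")], [("Class", "Junior"), ("Name", "bo")]]
def Spec_classSizes (data : List (List (String × String))) (out : List (String × Int)) : Prop := out = classSizes_alt data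
instance (data : List (List (String × String))) (out : List (String × Int)) : Decidable (Spec_classSizes data out) := by unfold Spec_classSizes; infer_instance

-- ===== CLAIM (what is proved, stated in full; the proofs are below) =====
def Claim_equal_classSizes : Prop := ∀ (data : List (List (String × String))), Dom_classSizes data → Pre_classSizes data → Spec_classSizes data (classSizes data)

-- ===== LEMMAS AND PROOFS =====

-- B's count for category c (sum of 0/1 indicators over data), named for the proofs
def pvCnt (c : String) (data : List (List (String × String))) : Int :=
  (data.map (fun x => if pvClassOf x == c then (1 : Int) else 0)).sum

-- one += step of A's loop on the 4-key literal dict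
lemma modLit (k : String) (a b c d : Int)
    (h : k = "Senior" ∨ k = "Junior" ∨ k = "Sophomore" ∨ k = "Freshman") :
    (PySem.Dict.mk [("Senior",a),("Junior",b),("Sophomore",c),("Freshman",d)]).modify k 0 (· + 1)
    = PySem.Dict.mk [("Senior", if k == "Senior" then a+1 else a),
        ("Junior", if k == "Junior" then b+1 else b),
        ("Sophomore", if k == "Sophomore" then c+1 else c),
        ("Freshman", if k == "Freshman" then d+1 else d)] := by
  rcases h with h | h | h | h <;> subst h <;> apply PySem.Dict.ext <;>
    simp [PySem.Dict.modify, PySem.Dict.items_insert, PySem.Dict.getD, PySem.Dict.get?, PySem.Dict.contains]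

-- A's loop invariant: each key's value grows by B's indicator count
lemma loop_inv (data : List (List (String × String))) (a b c d : Int) :
    data.foldl (fun d x =>
      let c := pvClassOf x
      if c == "Senior" then d.modify "Senior" 0 (· + 1)
      else if c == "Junior" then d.modify "Junior" 0 (· + 1)
      else if c == "Sophomore" then d.modify "Sophomore" 0 (· + 1)
      else if c == "Freshman" then d.modify "Freshman" 0 (· + 1)
      else d)
      (PySem.Dict.mk [("Senior", a), ("Junior", b), ("Sophomore", c), ("Freshman", d)])
    = PySem.Dict.mk [("Senior", a + pvCnt "Senior" data), ("Junior", b + pvCnt "Junior" data),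
        ("Sophomore", c + pvCnt "Sophomore" data), ("Freshman", d + pvCnt "Freshman" data)] := by
  induction data generalizing a b c d with
  | nil => simp [pvCnt]
  | cons x t ih =>
    simp only [List.foldl_cons]
    by_cases h1 : pvClassOf x = "Senior"
    · simp only [h1]
      rw [modLit _ _ _ _ _ (Or.inl rfl)]
      simp only [show (("Senior":String) == "Senior") = true from rfl,
        show (("Senior":String) == "Junior") = false from rfl,
        show (("Senior":String) == "Sophomore") = false from rfl,
        show (("Senior":String) == "Freshman") = false from rfl, if_true, Bool.false_eq_true, if_false]
      rw [ih]; simp [pvCnt, h1, add_assoc]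
    · by_cases h2 : pvClassOf x = "Junior"
      · simp only [h2]
        rw [modLit _ _ _ _ _ (Or.inr (Or.inl rfl))]
        simp only [show (("Junior":String) == "Senior") = false from rfl,
          show (("Junior":String) == "Junior") = true from rfl,
          show (("Junior":String) == "Sophomore") = false from rfl,
          show (("Junior":String) == "Freshman") = false from rfl, if_true, Bool.false_eq_true, if_false]
        rw [ih]; simp [pvCnt, h2, add_assoc]
      · by_cases h3 : pvClassOf x = "Sophomore"
        · simp only [h3]
          rw [modLit _ _ _ _ _ (Or.inr (Or.inr (Or.inl rfl)))]
          simp only [show (("Sophomore":String) == "Senior") = false from rfl,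
            show (("Sophomore":String) == "Junior") = false from rfl,
            show (("Sophomore":String) == "Sophomore") = true from rfl,
            show (("Sophomore":String) == "Freshman") = false from rfl, if_true, Bool.false_eq_true, if_false]
          rw [ih]; simp [pvCnt, h3, add_assoc]
        · by_cases h4 : pvClassOf x = "Freshman"
          · simp only [h4]
            rw [modLit _ _ _ _ _ (Or.inr (Or.inr (Or.inr rfl)))]
            simp only [show (("Freshman":String) == "Senior") = false from rfl,
              show (("Freshman":String) == "Junior") = false from rfl,
              show (("Freshman":String) == "Sophomore") = false from rfl,
              show (("Freshman":String) == "Freshman") = true from rfl, if_true, Bool.false_eq_true, if_false]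
            rw [ih]; simp [pvCnt, h4, add_assoc]
          · have hb1 : (pvClassOf x == "Senior") = false := by simp [h1]
            have hb2 : (pvClassOf x == "Junior") = false := by simp [h2]
            have hb3 : (pvClassOf x == "Sophomore") = false := by simp [h3]
            have hb4 : (pvClassOf x == "Freshman") = false := by simp [h4]
            simp only [hb1, hb2, hb3, hb4, Bool.false_eq_true, if_false]
            rw [ih]; simp [pvCnt, h1, h2, h3, h4]

-- ===== VERDICT (by name: the statement is the Claim_ definition above) =====
theorem classSizes_spec : Claim_equal_classSizes := by
  intro data _ _
  unfold Spec_classSizes classSizes classSizes_alt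
  have hinit : ((((PySem.Dict.empty.insert "Senior" (0:Int)).insert "Junior" 0).insert "Sophomore" 0).insert "Freshman" 0)
      = PySem.Dict.mk [("Senior", 0), ("Junior", 0), ("Sophomore", 0), ("Freshman", 0)] := by decide
  simp only [hinit, loop_inv]
  simp [pvCnt]
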